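-- pv_equiv track=rewrite | github.com/saumyaojha1407/ds_algo | amazon test.py | fillMissingBrackets
-- ===== SOURCE A (Python) =====
-- def check_balanced(s):
--     # start = ["[", "("]
--     # stop = [")", "]"]
--     # question_count = 0
--     # start_square = 0
--     # end_square = 0
--     # start_paran = 0
--     # end_paran = 0
--     start_square = s.count("[")
--     end_square = s.count("]")
--     start_paran = s.count("(")
--     end_paran = s.count(")")
--     question_count = s.count("?")
--     if start_square == end_square and start_paran == end_paran:
--         return True
--     elif abs(start_square - end_square) + abs(start_paran - end_paran) == question_count:
--         return True
--     return False
--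
-- def fillMissingBrackets(s):
--     # Write your code here
--     count = 0
--     for idx, character in enumerate(s):
--         if idx == len(s) -1 :
--             break
--         sub_str1 = s[0:idx + 1]
--         sub_str2 = s[idx + 1:]
--         if check_balanced(sub_str1) and check_balanced(sub_str2):
--             count += 1
--
--     return count
-- ===== SOURCE B (Python) =====
-- def _balanced(a, b, c, d, q):
--     return (a == b and c == d) or abs(a - b) + abs(c - d) == q
--
-- def fillMissingBrackets(s):
--     ta = s.count("[")
--     tb = s.count("]")
--     tc = s.count("(")
--     td = s.count(")")
--     tq = s.count("?")
--     a = b = c = d = q = 0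
--     res = 0
--     for ch in s[:-1]:
--         if ch == "[":
--             a += 1
--         elif ch == "]":
--             b += 1
--         elif ch == "(":
--             c += 1
--         elif ch == ")":
--             d += 1
--         elif ch == "?":
--             q += 1
--         if _balanced(a, b, c, d, q) and _balanced(ta - a, tb - b, tc - c, td - d, tq - q):
--             res += 1
--     return res
-- ===== Notes on version B (the rewrite author's own statement) =====
-- stated objective: faster
-- what changed: Replaces the per-split substring construction and five full substring scans with running prefix counters updated once per character plus totals computed once, O(1) balance test per split point.
import Mathlib
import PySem

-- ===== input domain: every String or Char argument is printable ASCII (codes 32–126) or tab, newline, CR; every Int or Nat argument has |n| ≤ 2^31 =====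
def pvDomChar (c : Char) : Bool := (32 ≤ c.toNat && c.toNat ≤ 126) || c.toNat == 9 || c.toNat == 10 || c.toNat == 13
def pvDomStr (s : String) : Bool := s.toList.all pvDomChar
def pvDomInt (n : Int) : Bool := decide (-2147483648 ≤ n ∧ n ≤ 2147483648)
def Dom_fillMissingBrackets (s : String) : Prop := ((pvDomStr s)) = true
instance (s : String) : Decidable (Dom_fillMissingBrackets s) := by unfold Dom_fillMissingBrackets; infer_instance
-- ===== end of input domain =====

-- B replaces A's per-split substring building and five full rescans by one pass with running prefix counters (objective: faster).

-- ===== PORT A =====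
-- check_balanced(s): five s.count calls (single-char needle), then the two-branch test (Python ints → Int, abs → |·|)
def checkBalanced (u : List Char) : Bool :=
  let startSquare : Int := PySem.Chars.count u ['[']
  let endSquare : Int := PySem.Chars.count u [']']
  let startParan : Int := PySem.Chars.count u ['(']
  let endParan : Int := PySem.Chars.count u [')']
  let questionCount : Int := PySem.Chars.count u ['?']
  if startSquare = endSquare ∧ startParan = endParan then true
  else if |startSquare - endSquare| + |startParan - endParan| = questionCount then true
  else false

-- the 'for idx, character in enumerate(s)' loop with its 'break' at idx == len(s)-1
def fillLoopA (cs : List Char) (rest : List (Int × Char)) (count : Int) : Int :=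
  match rest with
  | [] => count
  | (idx, _) :: rest' =>
    if idx = (cs.length : Int) - 1 then count
    else
      let subStr1 := PySem.List.slice cs (some 0) (some (idx + 1))
      let subStr2 := PySem.List.slice cs (some (idx + 1)) none
      fillLoopA cs rest'
        (if checkBalanced subStr1 && checkBalanced subStr2 then count + 1 else count)

def fillMissingBrackets (s : String) : Int :=
  fillLoopA s.toList (PySem.List.enumerate s.toList 0) 0

-- ===== PORT B =====
-- _balanced(a,b,c,d,q) from Source B
def balB (a b c d q : Int) : Bool := (a = b ∧ c = d) || |a - b| + |c - d| = q

-- one step of Source B's loop: update the prefix counters (if/elif chain), then test both halves in O(1)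
def stepB (ta tb tc td tq : Int) (st : Int × Int × Int × Int × Int × Int) (ch : Char) :
    Int × Int × Int × Int × Int × Int :=
  let (a, b, c, d, q, res) := st
  let (a, b, c, d, q) :=
    if ch = '[' then (a + 1, b, c, d, q)
    else if ch = ']' then (a, b + 1, c, d, q)
    else if ch = '(' then (a, b, c + 1, d, q)
    else if ch = ')' then (a, b, c, d + 1, q)
    else if ch = '?' then (a, b, c, d, q + 1)
    else (a, b, c, d, q)
  let res := if balB a b c d q && balB (ta - a) (tb - b) (tc - c) (td - d) (tq - q) then res + 1 else res
  (a, b, c, d, q, res)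

def fillMissingBrackets_alt (s : String) : Int :=
  let cs := s.toList
  -- the five one-time s.count("…") totals of Source B (single-character needles = List.count)
  let ta : Int := cs.count '['
  let tb : Int := cs.count ']'
  let tc : Int := cs.count '('
  let td : Int := cs.count ')'
  let tq : Int := cs.count '?'
  -- for ch in s[:-1]
  let st := cs.dropLast.foldl (stepB ta tb tc td tq) (0, 0, 0, 0, 0, 0)
  st.2.2.2.2.2

-- ===== PRECONDITION & SPEC =====
def Spec_fillMissingBrackets (s : String) (out : Int) : Prop := out = fillMissingBrackets_alt s
instance (s : String) (out : Int) : Decidable (Spec_fillMissingBrackets s out) := by unfold Spec_fillMissingBrackets; infer_instance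

-- ===== CLAIM (what is proved, stated in full; the proofs are below) =====
def Claim_equal_fillMissingBrackets : Prop := ∀ (s : String), Dom_fillMissingBrackets s → Spec_fillMissingBrackets s (fillMissingBrackets s)

-- ===== LEMMAS AND PROOFS =====

-- Python's str.count with a single-character needle is List.count
theorem go_singleton (c : Char) : ∀ (fuel : Nat) (l : List Char) (acc : Nat), l.length ≤ fuel →
    PySem.Chars.count.go [c] fuel l acc = acc + l.count c := by
  intro fuel
  induction fuel with
  | zero => intro l acc h; cases l with
    | nil => simp [PySem.Chars.count.go]
    | cons x t => simp at h
  | succ n ih =>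
    intro l acc h
    cases l with
    | nil => simp [PySem.Chars.count.go]
    | cons x t =>
      have ht : t.length ≤ n := by simpa using h
      simp only [PySem.Chars.count.go, List.isPrefixOf, List.length, List.drop]
      by_cases hc : c = x
      · subst hc
        simp only [beq_self_eq_true, Bool.true_and, if_true, ih t (acc + 1) ht,
          List.count_cons_self]
        omega
      · have hbeq : (c == x) = false := by simp [hc]
        simp [hbeq, ih t acc ht, List.count_cons, Ne.symm hc]

theorem count_singleton (u : List Char) (c : Char) : PySem.Chars.count u [c] = u.count c := by
  simp [PySem.Chars.count, go_singleton c u.length u 0 (le_refl _)]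

-- A's branch chain and B's _balanced are the same test on the five counts
theorem checkBalanced_eq_balB (u : List Char) :
    checkBalanced u = balB (u.count '[') (u.count ']') (u.count '(') (u.count ')') (u.count '?') := by
  simp only [checkBalanced, balB, count_singleton]
  split_ifs with h1 h2 <;> simp_all

-- the common predicate: splitting the string after the first m characters leaves two balanced halves
def goodAt (cs : List Char) (m : Nat) : Bool :=
  checkBalanced (cs.take m) && checkBalanced (cs.drop m)

-- A's loop counts the good split positions among j..len-2
theorem fillLoopA_spec (cs : List Char) : ∀ (fuel j : Nat) (count : Int),
    cs.length - j ≤ fuel →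
    fillLoopA cs (PySem.List.enumerate (cs.drop j) (j : Int)) count =
      count + ((List.range' j (cs.length - 1 - j)).countP (fun k => goodAt cs (k + 1)) : Int) := by
  intro fuel
  induction fuel with
  | zero =>
    intro j count h
    have hj : cs.length ≤ j := by omega
    rw [List.drop_eq_nil_of_le hj]
    have h0 : cs.length - 1 - j = 0 := by omega
    simp [h0, PySem.List.enumerate, fillLoopA]
  | succ n ih =>
    intro j count h
    rcases Nat.lt_or_ge j cs.length with hlt | hge
    · rw [List.drop_eq_getElem_cons hlt, PySem.List.enumerate_cons, fillLoopA]
      by_cases hlast : j = cs.length - 1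
      · have hcast : (j : Int) = (cs.length : Int) - 1 := by omega
        rw [if_pos hcast]
        have h0 : cs.length - 1 - j = 0 := by omega
        simp [h0]
      · have hne : ¬ ((j : Int) = (cs.length : Int) - 1) := by omega
        rw [if_neg hne]
        have hcast : (j : Int) + 1 = ((j + 1 : Nat) : Int) := by push_cast; ring
        rw [hcast, PySem.List.slice_zero_start, PySem.List.slice_to_natCast,
          PySem.List.slice_from_natCast, ih (j + 1) _ (by omega)]
        have hrange : cs.length - 1 - j = (cs.length - 1 - (j + 1)) + 1 := by omega
        rw [hrange, List.range'_succ, List.countP_cons]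
        simp only [goodAt]
        split_ifs <;> simp_all <;> ring
    · rw [List.drop_eq_nil_of_le hge]
      have h0 : cs.length - 1 - j = 0 := by omega
      simp [h0, PySem.List.enumerate, fillLoopA]

-- B's if/elif counter update produces the counts of the extended prefix
theorem counts_snoc (pre : List Char) (ch : Char) :
    (if ch = '[' then ((pre.count '[' : Int) + 1, (pre.count ']' : Int), (pre.count '(' : Int), (pre.count ')' : Int), (pre.count '?' : Int))
    else if ch = ']' then ((pre.count '[' : Int), (pre.count ']' : Int) + 1, (pre.count '(' : Int), (pre.count ')' : Int), (pre.count '?' : Int))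
    else if ch = '(' then ((pre.count '[' : Int), (pre.count ']' : Int), (pre.count '(' : Int) + 1, (pre.count ')' : Int), (pre.count '?' : Int))
    else if ch = ')' then ((pre.count '[' : Int), (pre.count ']' : Int), (pre.count '(' : Int), (pre.count ')' : Int) + 1, (pre.count '?' : Int))
    else if ch = '?' then ((pre.count '[' : Int), (pre.count ']' : Int), (pre.count '(' : Int), (pre.count ')' : Int), (pre.count '?' : Int) + 1)
    else ((pre.count '[' : Int), (pre.count ']' : Int), (pre.count '(' : Int), (pre.count ')' : Int), (pre.count '?' : Int))) =
    (((pre ++ [ch]).count '[' : Int), ((pre ++ [ch]).count ']' : Int), ((pre ++ [ch]).count '(' : Int),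
      ((pre ++ [ch]).count ')' : Int), ((pre ++ [ch]).count '?' : Int)) := by
  split_ifs <;> simp_all [List.count_append]

-- B's O(1) test on (prefix counts, totals - prefix counts) is exactly goodAt
theorem cond_eq (cs pre' : List Char) (h : pre' <+: cs) :
    (balB (pre'.count '[') (pre'.count ']') (pre'.count '(') (pre'.count ')') (pre'.count '?') &&
      balB ((cs.count '[' : Int) - pre'.count '[') ((cs.count ']' : Int) - pre'.count ']')
        ((cs.count '(' : Int) - pre'.count '(') ((cs.count ')' : Int) - pre'.count ')')
        ((cs.count '?' : Int) - pre'.count '?')) = goodAt cs pre'.length := by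
  have htake : cs.take pre'.length = pre' := (List.prefix_iff_eq_take.mp h).symm
  have hsplit : ∀ c : Char, (cs.count c : Int) - pre'.count c = ((cs.drop pre'.length).count c : Int) := by
    intro c
    conv_lhs => rw [← List.take_append_drop pre'.length cs]
    rw [htake]
    push_cast [List.count_append]
    ring
  rw [goodAt, htake, checkBalanced_eq_balB, checkBalanced_eq_balB,
    hsplit '[', hsplit ']', hsplit '(', hsplit ')', hsplit '?']

-- B's fold counts the good split positions among |pre|..|pre|+|suf|-1
theorem foldB_go (cs : List Char) : ∀ (suf pre : List Char) (res : Int),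
    pre ++ suf <+: cs →
    ((suf.foldl (stepB (cs.count '[') (cs.count ']') (cs.count '(') (cs.count ')') (cs.count '?'))
      ((pre.count '[' : Int), (pre.count ']' : Int), (pre.count '(' : Int), (pre.count ')' : Int),
        (pre.count '?' : Int), res)).2.2.2.2.2) =
      res + ((List.range' pre.length suf.length).countP (fun k => goodAt cs (k + 1)) : Int) := by
  intro suf
  induction suf with
  | nil => intro pre res _; simp
  | cons ch suf' ih =>
    intro pre res hpre
    rw [List.foldl_cons]
    have hpre' : pre ++ [ch] <+: cs := by
      have h0 : pre ++ [ch] <+: pre ++ ch :: suf' := by simp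
      exact h0.trans hpre
    have hstep : stepB (cs.count '[') (cs.count ']') (cs.count '(') (cs.count ')') (cs.count '?')
        ((pre.count '[' : Int), (pre.count ']' : Int), (pre.count '(' : Int), (pre.count ')' : Int),
          (pre.count '?' : Int), res) ch =
        (((pre ++ [ch]).count '[' : Int), ((pre ++ [ch]).count ']' : Int), ((pre ++ [ch]).count '(' : Int),
          ((pre ++ [ch]).count ')' : Int), ((pre ++ [ch]).count '?' : Int),
          if goodAt cs (pre.length + 1) then res + 1 else res) := by
      have hlen : pre.length + 1 = (pre ++ [ch]).length := by simp
      simp only [stepB, counts_snoc pre ch]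
      rw [hlen, ← cond_eq cs (pre ++ [ch]) hpre']
    rw [hstep, ih (pre ++ [ch]) _ (by simpa using hpre)]
    rw [List.length_cons, List.range'_succ, List.countP_cons]
    simp only [List.length_append, List.length_cons, List.length_nil, Nat.zero_add]
    split_ifs <;> (push_cast; ring)

-- ===== VERDICT (by name: the statement is the Claim_ definition above) =====
theorem fillMissingBrackets_spec : Claim_equal_fillMissingBrackets := by
  intro s _
  unfold Spec_fillMissingBrackets fillMissingBrackets fillMissingBrackets_alt
  have hA := fillLoopA_spec s.toList s.toList.length 0 0 (by omega)
  simp only [List.drop_zero, Nat.cast_zero, Nat.sub_zero] at hA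
  have hB := foldB_go s.toList s.toList.dropLast [] 0 (by simpa using s.toList.dropLast_prefix)
  simp only [List.count_nil, Nat.cast_zero, List.length_nil, List.length_dropLast] at hB
  rw [hA, hB]
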